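-- pv_equiv track=rewrite | github.com/annnyc/flow-shop | files/trabalho.py | findWorstSolution
-- ===== SOURCE A (Python) =====
-- def makespan(instancia, solucao):
--     nM = len(instancia)
--     tempo = [0] * nM
--     tarefa = [0] * len(solucao)
--     for t in solucao:
--         if tarefa[t - 1] == 1:
--             return "SOLUÇÃO INVÁLIDA: tarefa repetida!"
--         else:
--             tarefa[t - 1] = 1
--         for m in range(nM):
--             if tempo[m] < tempo[m - 1] and m != 0:
--                 tempo[m] = tempo[m - 1]
--             tempo[m] += instancia[m][t - 1]
--     return tempo[nM - 1]
--
-- def findWorstSolution(pop, data):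
--     worstSolInd = 0
--     worstSol = makespan(data, pop[worstSolInd])
--     for i in range(1, len(pop)):
--         tempObj = makespan(data, pop[i])
--         if worstSol < tempObj:
--             worstSol = tempObj
--             worstSolInd = i
--
--     return worstSolInd, worstSol
-- ===== SOURCE B (Python) =====
-- def _makespan(inst, sol):
--     # validity pass: mark the tasks, report a repeat with the exact message
--     seen = [0] * len(sol)
--     for t in sol:
--         if seen[t - 1]:
--             return "SOLU\u00c7\u00c3O INV\u00c1LIDA: tarefa repetida!"
--         seen[t - 1] = 1
--     # machine-outer dynamic programme over full completion-time rows: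
--     # row[j] = completion time of the j-th job of sol on the current machine
--     row = []
--     acc = 0
--     for t in sol:                      # machine 0: plain running sum
--         acc += inst[0][t - 1]
--         row.append(acc)
--     for m in range(1, len(inst)):
--         prev = row
--         row = []
--         acc = 0
--         for j, t in enumerate(sol):
--             acc = inst[m][t - 1] + max(acc, prev[j])
--             row.append(acc)
--     return row[-1] if row else 0
--
-- def findWorstSolution(pop, data):
--     ms = [_makespan(data, sol) for sol in pop]
--     worst = max(ms)                    # first maximum, like A's strict-< scan
--     return ms.index(worst), worst
-- ===== Notes on version B (the rewrite author's own statement) =====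
-- stated objective: alternative
-- what changed: makespan is recomputed with the machine loop outer and the job loop inner over full completion-time rows (validity checked in a separate first pass), and the worst member is found with max()/ms.index() over a precomputed makespan list instead of A's interleaved index-update scan.
import Mathlib
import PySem

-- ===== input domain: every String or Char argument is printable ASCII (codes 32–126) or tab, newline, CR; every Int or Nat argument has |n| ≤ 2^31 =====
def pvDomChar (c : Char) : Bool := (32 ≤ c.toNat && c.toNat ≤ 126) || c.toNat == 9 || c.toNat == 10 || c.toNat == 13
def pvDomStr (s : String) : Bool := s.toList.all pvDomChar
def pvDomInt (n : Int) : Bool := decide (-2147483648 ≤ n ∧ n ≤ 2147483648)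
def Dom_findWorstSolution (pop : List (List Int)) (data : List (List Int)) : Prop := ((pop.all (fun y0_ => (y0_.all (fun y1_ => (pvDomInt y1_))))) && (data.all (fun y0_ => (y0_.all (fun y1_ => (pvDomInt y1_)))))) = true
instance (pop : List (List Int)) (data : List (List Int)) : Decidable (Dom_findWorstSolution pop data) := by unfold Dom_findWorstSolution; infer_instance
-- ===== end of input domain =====

-- B recomputes makespan with the machine loop outer over full completion-time rows and finds the
-- worst member via max()/index(); equivalence is proved on valid inputs (objective: alternative).

-- ===== PORT A =====
-- body of makespan's inner machine loop 'for m in range(nM): ...'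
-- (pyGetD/pySetD are exact whenever the index is in range; IndexError inputs are excluded by Pre_)
def innerBody (instancia : List (List Int)) (t : Int) (tempo : List Int) (m : Int) : List Int :=
  let tempo1 := if PySem.List.pyGetD tempo m 0 < PySem.List.pyGetD tempo (m - 1) 0 ∧ m ≠ 0
    then PySem.List.pySetD tempo m (PySem.List.pyGetD tempo (m - 1) 0) else tempo
  PySem.List.pySetD tempo1 m
    (PySem.List.pyGetD tempo1 m 0 + PySem.List.pyGetD (PySem.List.pyGetD instancia m []) (t - 1) 0)

def mkAInner (instancia : List (List Int)) (t : Int) (tempo0 : List Int) : List Int :=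
  (PySem.List.pyRange 0 (instancia.length : Int) 1).foldl (innerBody instancia t) tempo0

-- makespan's job loop; 'none' stands for the Python paths that do not yield an int
-- (the "SOLUÇÃO INVÁLIDA…" string return); those inputs are excluded by Pre_.
def mkALoop (instancia : List (List Int)) : List Int → List Int → List Int → Option Int
  | [], _tarefa, tempo => some (PySem.List.pyGetD tempo ((instancia.length : Int) - 1) 0)
  | t :: rest, tarefa, tempo =>
    if PySem.List.pyGetD tarefa (t - 1) 0 = (1 : Int) then none
    else mkALoop instancia rest (PySem.List.pySetD tarefa (t - 1) 1) (mkAInner instancia t tempo)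

def makespan (instancia : List (List Int)) (solucao : List Int) : Option Int :=
  mkALoop instancia solucao (List.replicate solucao.length 0) (List.replicate instancia.length 0)

-- the scan 'for i in range(1, len(pop))'; a str/int comparison (TypeError) is excluded by Pre_
def fwsGo (data : List (List Int)) : List (List Int) → Int → Int → Option Int → Int × Option Int
  | [], _i, ind, w => (ind, w)
  | s :: rest, i, ind, w =>
    match w, makespan data s with
    | some a, some b =>
      if a < b then fwsGo data rest (i + 1) i (some b)
      else fwsGo data rest (i + 1) ind (some a)
    | w', _ => fwsGo data rest (i + 1) ind w'

def findWorstSolution (pop : List (List Int)) (data : List (List Int)) : Int × Int :=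
  match pop with
  | [] => (0, 0)  -- pop[0] raises IndexError; excluded by Pre_
  | s0 :: rest =>
    let r := fwsGo data rest 1 0 (makespan data s0)
    (r.1, r.2.getD 0)

-- ===== PORT B =====
-- validity pass of Source B's _makespan: mark tasks, 'none' = the invalid-repeat string (excluded by Pre_)
def checkTasks : List Int → List Int → Option Unit
  | [], _seen => some ()
  | t :: rest, seen =>
    if PySem.List.pyGetD seen (t - 1) 0 ≠ (0 : Int) then none
    else checkTasks rest (PySem.List.pySetD seen (t - 1) 1)

-- machine 0: plain running sum over the jobs
def rowFirst (r0 : List Int) : List Int → Int → List Int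
  | [], _acc => []
  | t :: rest, acc =>
    let acc' := acc + PySem.List.pyGetD r0 (t - 1) 0
    acc' :: rowFirst r0 rest acc'

-- 'for j, t in enumerate(sol): acc = inst[m][t-1] + max(acc, prev[j])' — prev read in lockstep with sol
def rowNext (rm : List Int) : List Int → List Int → Int → List Int
  | t :: rest, p :: prev, acc =>
    let acc' := PySem.List.pyGetD rm (t - 1) 0 + max acc p
    acc' :: rowNext rm rest prev acc'
  | _, _, _ => []

-- 'for m in range(1, len(inst))': the machines after the first
def rowsLoop (sol : List Int) : List (List Int) → List Int → List Int
  | [], row => row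
  | rm :: more, row => rowsLoop sol more (rowNext rm sol row 0)

def makespanAlt (inst : List (List Int)) (sol : List Int) : Option Int :=
  match checkTasks sol (List.replicate sol.length 0) with
  | none => none
  | some _ =>
    let row := rowsLoop sol (inst.drop 1) (rowFirst (PySem.List.pyGetD inst 0 []) sol 0)
    some (PySem.List.pyGetD row (-1) 0)   -- 'row[-1] if row else 0'

def findWorstSolution_alt (pop : List (List Int)) (data : List (List Int)) : Int × Int :=
  match (pop.map (fun sol => makespanAlt data sol)).mapM id with
  | none => (0, 0)   -- some member invalid: Python's max/comparison would raise; excluded by Pre_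
  | some ms =>
    match PySem.List.max? ms (fun v => v) with
    | none => (0, 0)  -- pop = []: max([]) raises ValueError; excluded by Pre_
    | some worst => ((((PySem.List.index? ms worst).getD 0 : Nat) : Int), worst)

-- ===== PRECONDITION & SPEC =====
-- pvEffI n t: the list cell Python's xs[t-1] reads in a length-n list (negative indices wrap)
def pvEffI (n : Nat) (t : Int) : Int := if t < 1 then t - 1 + n else t - 1

-- Pre_ excludes inputs where A raises (empty pop/data, a task index out of range for the task
-- array or some data row) or returns the "SOLUÇÃO INVÁLIDA" string instead of an int (two tasks
-- marking the same cell).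
def Pre_findWorstSolution (pop : List (List Int)) (data : List (List Int)) : Prop :=
  pop ≠ [] ∧ data ≠ [] ∧ ∀ sol ∈ pop, (sol.map (pvEffI sol.length)).Nodup ∧
    ∀ t ∈ sol, 1 - (sol.length : Int) ≤ t ∧ t ≤ (sol.length : Int) ∧
      ∀ row ∈ data, 1 - (row.length : Int) ≤ t ∧ t ≤ (row.length : Int)

instance (pop : List (List Int)) (data : List (List Int)) : Decidable (Pre_findWorstSolution pop data) := by
  unfold Pre_findWorstSolution; infer_instance

def pvWitness_findWorstSolution : List (List Int) × List (List Int) :=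
  ([[1, 2], [2, 1]], [[1, 2], [3, 1]])

def Spec_findWorstSolution (pop : List (List Int)) (data : List (List Int)) (out : Int × Int) : Prop := out = findWorstSolution_alt pop data
instance (pop : List (List Int)) (data : List (List Int)) (out : Int × Int) : Decidable (Spec_findWorstSolution pop data out) := by unfold Spec_findWorstSolution; infer_instance

-- ===== CLAIM (what is proved, stated in full; the proofs are below) =====
def Claim_equal_findWorstSolution : Prop := ∀ (pop : List (List Int)) (data : List (List Int)), Dom_findWorstSolution pop data → Pre_findWorstSolution pop data → Spec_findWorstSolution pop data (findWorstSolution pop data)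

-- ===== LEMMAS AND PROOFS =====

-- proof-side structural form of A's inner loop: the updated column, scanned machine by machine
def colGo : List (List Int) → List Int → Int → Int → List Int
  | r :: rs, c :: cs, t, v =>
    let v' := max c v + PySem.List.pyGetD r (t - 1) 0
    v' :: colGo rs cs t v'
  | _, _, _, _ => []

def colStep : List (List Int) → Int → List Int → List Int
  | r :: rs, t, c :: cs =>
    let v := c + PySem.List.pyGetD r (t - 1) 0
    v :: colGo rs cs t v
  | _, _, tempo => tempo

-- proof-side: the column of last entries of B's rows (machines after the first)
def lastColTail (sol : List Int) : List (List Int) → List Int → List Int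
  | [], _prev => []
  | rm :: more, prev =>
    let R := rowNext rm sol prev 0
    R.getLastD 0 :: lastColTail sol more R

-- small index helpers
lemma pv_getD_append {α : Type} (l : List α) (c : α) (r : List α) (d : α) :
    PySem.List.pyGetD (l ++ c :: r) (l.length : Int) d = c := by
  rw [PySem.List.pyGetD_natCast]
  simp [List.getD_eq_getElem?_getD]

lemma pv_setD_append {α : Type} (l : List α) (c v : α) (r : List α) :
    PySem.List.pySetD (l ++ c :: r) (l.length : Int) v = l ++ v :: r := by
  rw [PySem.List.pySetD_natCast]
  simp

lemma pv_getD_append_last {α : Type} (l r : List α) (d : α) (h : l ≠ []) :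
    PySem.List.pyGetD (l ++ r) ((l.length : Int) - 1) d = l.getLastD d := by
  have h1 : 0 < l.length := List.length_pos_iff.2 h
  have e : ((l.length : Int) - 1) = ((l.length - 1 : Nat) : Int) := by omega
  rw [e, PySem.List.pyGetD_natCast]
  rw [List.getD_eq_getElem?_getD, List.getElem?_append_left (by omega)]
  rw [List.getLastD_eq_getLast?, List.getLast?_eq_getElem?]

lemma pv_getD_neg_one {α : Type} (xs : List α) (d : α) :
    PySem.List.pyGetD xs (-1) d = xs.getLastD d := by
  cases xs with
  | nil => simp [PySem.List.pyGetD, PySem.List.pyGet?]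
  | cons x t =>
    rw [PySem.List.pyGetD_neg_one (x :: t) d (by simp)]
    rw [List.getLastD_eq_getLast?, List.getLast?_eq_some_getLast (by simp)]
    simp

lemma pv_getD_last {α : Type} (xs : List α) (d : α) (h : xs ≠ []) :
    PySem.List.pyGetD xs ((xs.length : Int) - 1) d = xs.getLastD d := by
  have := pv_getD_append_last xs [] d h
  simpa using this

lemma pv_mapM_map_some {α : Type} (vs : List α) : (vs.map some).mapM id = some vs := by
  induction vs with
  | nil => rfl
  | cons v t ih => simp [List.mapM_cons, ih]

lemma pv_getD_replicate {α : Type} (n : Nat) (x : α) (i : Int) :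
    PySem.List.pyGetD (List.replicate n x) i x = x := by
  unfold PySem.List.pyGetD
  cases h : PySem.List.pyGet? (List.replicate n x) i with
  | none => rfl
  | some y =>
    have hy := PySem.List.mem_of_pyGet?_eq_some (x := y) (xs := List.replicate n x) (i := i) h
    have : y = x := List.eq_of_mem_replicate hy
    simp [this]

lemma pv_pyIdx_eff (n : Nat) (t : Int) (h1 : 1 - (n : Int) ≤ t) (h2 : t ≤ (n : Int)) :
    PySem.List.pyIdx? n (t - 1) = some (pvEffI n t).toNat := by
  unfold PySem.List.pyIdx? pvEffI
  split_ifs <;> (try rfl) <;> simp_all <;> omega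

lemma pv_getD_eff (xs : List Int) (t : Int) (d : Int) (h1 : 1 - (xs.length : Int) ≤ t)
    (h2 : t ≤ (xs.length : Int)) :
    PySem.List.pyGetD xs (t - 1) d = xs.getD (pvEffI xs.length t).toNat d := by
  unfold PySem.List.pyGetD PySem.List.pyGet?
  rw [pv_pyIdx_eff _ _ h1 h2]
  simp [List.getD_eq_getElem?_getD]

lemma pv_setD_eff (xs : List Int) (t v : Int) (h1 : 1 - (xs.length : Int) ≤ t)
    (h2 : t ≤ (xs.length : Int)) :
    PySem.List.pySetD xs (t - 1) v = xs.set (pvEffI xs.length t).toNat v := by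
  unfold PySem.List.pySetD PySem.List.pySet?
  rw [pv_pyIdx_eff _ _ h1 h2]
  rfl

lemma pv_getD_setD_ne (xs : List Int) (t t' : Int)
    (h1 : 1 - (xs.length : Int) ≤ t) (h2 : t ≤ (xs.length : Int))
    (h3 : 1 - (xs.length : Int) ≤ t') (h4 : t' ≤ (xs.length : Int))
    (hne : pvEffI xs.length t' ≠ pvEffI xs.length t) :
    PySem.List.pyGetD (PySem.List.pySetD xs (t - 1) 1) (t' - 1) 0
      = PySem.List.pyGetD xs (t' - 1) 0 := by
  rw [pv_setD_eff xs t 1 h1 h2]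
  rw [pv_getD_eff _ t' 0 (by simpa using h3) (by simpa using h4)]
  rw [pv_getD_eff xs t' 0 h3 h4]
  simp only [List.length_set]
  rw [List.getD_eq_getElem?_getD, List.getD_eq_getElem?_getD, List.getElem?_set_ne]
  unfold pvEffI at hne ⊢
  split_ifs at hne ⊢ <;> omega

lemma length_colGo (t : Int) : ∀ (rs : List (List Int)) (cs : List Int) (v : Int),
    (colGo rs cs t v).length = min rs.length cs.length := by
  intro rs
  induction rs with
  | nil => intro cs v; cases cs <;> simp [colGo]
  | cons r rs ih =>
    intro cs v
    cases cs with
    | nil => simp [colGo]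
    | cons c cs => simp [colGo, ih]

lemma length_colStep (inst : List (List Int)) (t : Int) (tempo : List Int)
    (h : tempo.length = inst.length) : (colStep inst t tempo).length = tempo.length := by
  cases inst with
  | nil => cases tempo <;> simp [colStep]
  | cons r rs =>
    cases tempo with
    | nil => simp [colStep]
    | cons c cs => simp [colStep, length_colGo]; simp at h; omega

lemma pv_setD_zero_cons {α : Type} (c v : α) (cs : List α) :
    PySem.List.pySetD (c :: cs) 0 v = v :: cs := by
  have := pv_setD_append ([] : List α) c v cs
  simpa using this

-- one pass of the inner loop body at machine index done.length (the current cell)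
lemma innerBody_at (inst : List (List Int)) (t : Int) (done : List Int) (c : Int) (cs : List Int)
    (hne : done ≠ []) :
    innerBody inst t (done ++ c :: cs) (done.length : Int)
      = done ++ (max c (done.getLastD 0)
          + PySem.List.pyGetD (PySem.List.pyGetD inst (done.length : Int) []) (t - 1) 0) :: cs := by
  unfold innerBody
  rw [pv_getD_append, pv_getD_append_last _ _ _ hne]
  have hz : ((done.length : Int)) ≠ 0 := by
    have := List.length_pos_iff.2 hne; omega
  by_cases hlt : c < done.getLastD 0
  · rw [if_pos ⟨hlt, hz⟩]
    dsimp only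
    rw [pv_setD_append, pv_getD_append, pv_setD_append]
    have : max c (done.getLastD 0) = done.getLastD 0 := by omega
    rw [this]
  · rw [if_neg (by tauto)]
    dsimp only
    rw [pv_getD_append, pv_setD_append]
    have : max c (done.getLastD 0) = c := by omega
    rw [this]

-- A's indexed inner loop, from machine a onward, equals the structural scan colGo
lemma inner_from (inst : List (List Int)) (t : Int) :
    ∀ (todoR : List (List Int)) (todoC done : List Int) (preR : List (List Int)),
    inst = preR ++ todoR → done.length = preR.length → done ≠ [] → todoC.length = todoR.length →
    (PySem.List.pyRange (done.length : Int) (inst.length : Int) 1).foldl (innerBody inst t) (done ++ todoC)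
      = done ++ colGo todoR todoC t (done.getLastD 0) := by
  intro todoR
  induction todoR with
  | nil =>
    intro todoC done preR hinst hlen hne hlc
    have : todoC = [] := List.eq_nil_of_length_eq_zero (by simpa using hlc)
    subst this
    rw [PySem.List.pyRange_one_eq_nil (by simp [hinst, hlen])]
    simp [colGo]
  | cons r rs ih =>
    intro todoC done preR hinst hlen hne hlc
    cases todoC with
    | nil => simp at hlc
    | cons c cs =>
      have hlt : (done.length : Int) < (inst.length : Int) := by
        simp [hinst]; omega
      rw [PySem.List.pyRange_one_cons hlt]
      rw [List.foldl_cons]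
      have hr : PySem.List.pyGetD inst (done.length : Int) [] = r := by
        rw [hinst, hlen]
        exact pv_getD_append preR r rs []
      rw [innerBody_at inst t done c cs hne]
      rw [hr]
      have e1 : ∀ v : Int, done ++ v :: cs = (done ++ [v]) ++ cs := by simp
      have e2 : ∀ v : Int, ((done.length : Int) + 1) = (((done ++ [v]).length : Nat) : Int) := by
        simp
      rw [e1, e2, ih cs (done ++ _) (preR ++ [r]) (by simp [hinst]) (by simp [hlen]) (by simp)
        (by simpa using hlc)]
      rw [List.getLastD_concat]
      simp [colGo]

lemma mkAInner_eq_colStep (inst : List (List Int)) (t : Int) (tempo : List Int)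
    (h : tempo.length = inst.length) : mkAInner inst t tempo = colStep inst t tempo := by
  cases inst with
  | nil =>
    have : tempo = [] := List.eq_nil_of_length_eq_zero (by simpa using h)
    subst this
    simp [mkAInner, colStep, PySem.List.pyRange_one_eq_nil (le_refl 0)]
  | cons r rs =>
    cases tempo with
    | nil => simp at h
    | cons c cs =>
      unfold mkAInner
      rw [PySem.List.pyRange_one_cons (by simp)]
      rw [List.foldl_cons]
      have hb : innerBody (r :: rs) t (c :: cs) 0
          = (c + PySem.List.pyGetD r (t - 1) 0) :: cs := by
        unfold innerBody
        rw [if_neg (by simp)]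
        dsimp only
        rw [PySem.List.pyGetD_zero_cons, PySem.List.pyGetD_zero_cons, pv_setD_zero_cons]
      rw [hb]
      have hif := inner_from (r :: rs) t rs cs [c + PySem.List.pyGetD r (t - 1) 0] [r]
        rfl (by simp) (by simp) (by simpa using h)
      simp only [List.length_cons, List.length_nil, List.singleton_append] at hif
      norm_num at hif
      rw [show ((r :: rs).length : Int) = ((rs.length : Int) + 1) by simp,
          show ((0:Int) + 1) = 1 by ring, hif]
      simp [colStep]

-- A's job loop: the guard never fires and the tempo evolution is the colStep fold
lemma mkALoop_eq (inst : List (List Int)) : ∀ (sol tarefa tempo : List Int),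
    (sol.map (pvEffI tarefa.length)).Nodup →
    (∀ t ∈ sol, (1 - (tarefa.length : Int) ≤ t ∧ t ≤ (tarefa.length : Int))
      ∧ PySem.List.pyGetD tarefa (t - 1) 0 = 0) →
    tempo.length = inst.length →
    mkALoop inst sol tarefa tempo
      = some (PySem.List.pyGetD (sol.foldl (fun tp t' => colStep inst t' tp) tempo)
          ((inst.length : Int) - 1) 0) := by
  intro sol
  induction sol with
  | nil => intro tarefa tempo _ _ _; simp [mkALoop]
  | cons t rest ih =>
    intro tarefa tempo hnd hts hlen
    have ht := hts t (by simp)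
    simp only [mkALoop]
    rw [if_neg (by simp [ht.2])]
    rw [mkAInner_eq_colStep _ _ _ hlen]
    have hlset : (PySem.List.pySetD tarefa (t - 1) 1).length = tarefa.length := by
      simp [PySem.List.length_pySetD]
    have hndm := List.nodup_cons.1 (by simpa using hnd :
      (pvEffI tarefa.length t :: rest.map (pvEffI tarefa.length)).Nodup)
    have hrest : ∀ t' ∈ rest,
        (1 - ((PySem.List.pySetD tarefa (t - 1) 1).length : Int) ≤ t'
          ∧ t' ≤ ((PySem.List.pySetD tarefa (t - 1) 1).length : Int))
        ∧ PySem.List.pyGetD (PySem.List.pySetD tarefa (t - 1) 1) (t' - 1) 0 = 0 := by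
      intro t' ht'
      have h' := hts t' (by simp [ht'])
      refine ⟨by rw [hlset]; exact h'.1, ?_⟩
      rw [pv_getD_setD_ne tarefa t t' ht.1.1 ht.1.2 h'.1.1 h'.1.2
        (fun e => hndm.1 (e ▸ List.mem_map_of_mem ht'))]
      exact h'.2
    have hlen' : (colStep inst t tempo).length = inst.length := by
      rw [length_colStep _ _ _ hlen, hlen]
    rw [ih _ _ (by rw [hlset]; exact hndm.2) hrest hlen']
    simp

-- B's validity pass succeeds on a valid solution
lemma checkTasks_some : ∀ (sol seen : List Int),
    (sol.map (pvEffI seen.length)).Nodup →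
    (∀ t ∈ sol, (1 - (seen.length : Int) ≤ t ∧ t ≤ (seen.length : Int))
      ∧ PySem.List.pyGetD seen (t - 1) 0 = 0) →
    checkTasks sol seen = some () := by
  intro sol
  induction sol with
  | nil => intro seen _ _; rfl
  | cons t rest ih =>
    intro seen hnd hts
    have ht := hts t (by simp)
    simp only [checkTasks]
    rw [if_neg (by simp [ht.2])]
    have hlset : (PySem.List.pySetD seen (t - 1) 1).length = seen.length := by
      simp [PySem.List.length_pySetD]
    have hndm := List.nodup_cons.1 (by simpa using hnd :
      (pvEffI seen.length t :: rest.map (pvEffI seen.length)).Nodup)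
    apply ih _ (by rw [hlset]; exact hndm.2)
    intro t' ht'
    have h' := hts t' (by simp [ht'])
    refine ⟨by rw [hlset]; exact h'.1, ?_⟩
    rw [pv_getD_setD_ne seen t t' ht.1.1 ht.1.2 h'.1.1 h'.1.2
      (fun e => hndm.1 (e ▸ List.mem_map_of_mem ht'))]
    exact h'.2

lemma length_rowFirst (r0 : List Int) : ∀ (sol : List Int) (acc : Int),
    (rowFirst r0 sol acc).length = sol.length := by
  intro sol
  induction sol with
  | nil => intro acc; simp [rowFirst]
  | cons t rest ih => intro acc; simp [rowFirst, ih]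

lemma length_rowNext (rm : List Int) : ∀ (sol prev : List Int) (acc : Int),
    (rowNext rm sol prev acc).length = min sol.length prev.length := by
  intro sol
  induction sol with
  | nil => intro prev acc; cases prev <;> simp [rowNext]
  | cons t rest ih =>
    intro prev acc
    cases prev with
    | nil => simp [rowNext]
    | cons p prev => simp [rowNext, ih]

lemma rowFirst_append (r0 : List Int) (t : Int) : ∀ (sol : List Int) (acc : Int),
    rowFirst r0 (sol ++ [t]) acc
      = rowFirst r0 sol acc
        ++ [(rowFirst r0 sol acc).getLastD acc + PySem.List.pyGetD r0 (t - 1) 0] := by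
  intro sol
  induction sol with
  | nil => intro acc; simp [rowFirst]
  | cons t' rest ih =>
    intro acc
    simp only [List.cons_append, rowFirst]
    rw [ih]
    simp only [List.getLastD_cons]

lemma rowNext_append (rm : List Int) (t q : Int) : ∀ (sol prev : List Int) (acc : Int),
    prev.length = sol.length →
    rowNext rm (sol ++ [t]) (prev ++ [q]) acc
      = rowNext rm sol prev acc
        ++ [PySem.List.pyGetD rm (t - 1) 0 + max ((rowNext rm sol prev acc).getLastD acc) q] := by
  intro sol
  induction sol with
  | nil =>
    intro prev acc h
    have : prev = [] := List.eq_nil_of_length_eq_zero (by simpa using h)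
    subst this
    simp [rowNext]
  | cons t' rest ih =>
    intro prev acc h
    cases prev with
    | nil => simp at h
    | cons p prev =>
      simp only [List.cons_append, rowNext]
      rw [ih _ _ (by simpa using h)]
      simp only [List.getLastD_cons]

-- the loop interchange, one machine tail at a time
lemma tailStep (sol : List Int) (t : Int) : ∀ (rs : List (List Int)) (prev : List Int) (v : Int),
    prev.length = sol.length →
    colGo rs (lastColTail sol rs prev) t v = lastColTail (sol ++ [t]) rs (prev ++ [v]) := by
  intro rs
  induction rs with
  | nil => intro prev v _; simp [colGo, lastColTail]
  | cons rm more ih =>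
    intro prev v h
    simp only [lastColTail, colGo]
    rw [rowNext_append rm t v sol prev 0 h]
    rw [List.getLastD_concat]
    have hlen : (rowNext rm sol prev 0).length = sol.length := by
      rw [length_rowNext]; omega
    rw [ih _ _ hlen]
    have : max ((rowNext rm sol prev 0).getLastD 0) v + PySem.List.pyGetD rm (t - 1) 0
        = PySem.List.pyGetD rm (t - 1) 0 + max ((rowNext rm sol prev 0).getLastD 0) v := by ring
    rw [this]

lemma lastColTail_nil : ∀ (rs : List (List Int)) (prev : List Int),
    lastColTail [] rs prev = List.replicate rs.length 0 := by
  intro rs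
  induction rs with
  | nil => intro prev; simp [lastColTail]
  | cons rm more ih =>
    intro prev
    simp only [lastColTail, rowNext]
    rw [ih]
    simp [List.replicate_succ]

-- the full interchange: job-outer fold of columns = column of last entries of B's rows
lemma fold_colStep_eq (r0 : List Int) (rs : List (List Int)) : ∀ (sol : List Int),
    sol.foldl (fun tp t' => colStep (r0 :: rs) t' tp) (0 :: List.replicate rs.length 0)
      = (rowFirst r0 sol 0).getLastD 0 :: lastColTail sol rs (rowFirst r0 sol 0) := by
  intro sol
  induction sol using List.reverseRecOn with
  | nil => simp [rowFirst, lastColTail_nil]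
  | append_singleton sol t ih =>
    rw [List.foldl_append, ih]
    simp only [List.foldl_cons, List.foldl_nil, colStep]
    rw [rowFirst_append]
    rw [List.getLastD_concat]
    congr 1
    rw [tailStep sol t rs (rowFirst r0 sol 0) _ (length_rowFirst r0 sol 0)]

lemma lastColTail_getLastD (sol : List Int) : ∀ (rs : List (List Int)) (R : List Int),
    (lastColTail sol rs R).getLastD (R.getLastD 0) = (rowsLoop sol rs R).getLastD 0 := by
  intro rs
  induction rs with
  | nil => intro R; simp [lastColTail, rowsLoop]
  | cons rm more ih =>
    intro R
    simp only [lastColTail, rowsLoop, List.getLastD_cons]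
    exact ih _

lemma length_lastColTail (sol : List Int) : ∀ (rs : List (List Int)) (R : List Int),
    (lastColTail sol rs R).length = rs.length := by
  intro rs
  induction rs with
  | nil => intro R; simp [lastColTail]
  | cons rm more ih => intro R; simp [lastColTail, ih]

-- the per-member value both sides compute
def valOf (data : List (List Int)) (sol : List Int) : Int :=
  PySem.List.pyGetD (rowsLoop sol (data.drop 1) (rowFirst (PySem.List.pyGetD data 0 []) sol 0)) (-1) 0

lemma makespanAlt_eq_val (data : List (List Int)) (sol : List Int)
    (hnd : (sol.map (pvEffI sol.length)).Nodup)
    (hts : ∀ t ∈ sol, 1 - (sol.length : Int) ≤ t ∧ t ≤ (sol.length : Int)) :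
    makespanAlt data sol = some (valOf data sol) := by
  unfold makespanAlt valOf
  rw [checkTasks_some sol _ (by simpa using hnd) ?_]
  intro t ht
  have h := hts t ht
  exact ⟨by simpa using h, pv_getD_replicate _ _ _⟩

lemma makespan_eq_val (data : List (List Int)) (sol : List Int) (hd : data ≠ [])
    (hnd : (sol.map (pvEffI sol.length)).Nodup)
    (hts : ∀ t ∈ sol, 1 - (sol.length : Int) ≤ t ∧ t ≤ (sol.length : Int)) :
    makespan data sol = some (valOf data sol) := by
  obtain ⟨r0, rs, rfl⟩ : ∃ r0 rs, data = r0 :: rs := by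
    cases data with
    | nil => exact absurd rfl hd
    | cons a b => exact ⟨a, b, rfl⟩
  unfold makespan
  rw [mkALoop_eq _ sol _ _ (by simpa using hnd) ?_ (by simp)]
  · congr 1
    rw [show List.replicate (r0 :: rs).length (0 : Int) = 0 :: List.replicate rs.length 0 by
      simp [List.replicate_succ]]
    rw [fold_colStep_eq r0 rs sol]
    have hlenfc : ((rowFirst r0 sol 0).getLastD 0 :: lastColTail sol rs (rowFirst r0 sol 0)).length
        = (r0 :: rs).length := by
      simp [length_lastColTail]
    rw [show (((r0 :: rs).length : Nat) : Int) - 1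
        = ((((rowFirst r0 sol 0).getLastD 0 :: lastColTail sol rs (rowFirst r0 sol 0)).length : Nat) : Int) - 1
      from by rw [hlenfc]]
    rw [pv_getD_last _ _ (by simp)]
    rw [List.getLastD_cons]
    rw [lastColTail_getLastD]
    unfold valOf
    rw [pv_getD_neg_one]
    simp [PySem.List.pyGetD_zero_cons]
  · intro t ht
    have h := hts t ht
    exact ⟨by simpa using h, pv_getD_replicate _ _ _⟩

-- the outer scan: A's strict-< walk lands on the first occurrence of the maximum
lemma fwsGo_eq (data : List (List Int)) : ∀ (rest : List (List Int)) (pre : List Int) (ind : Nat) (w : Int),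
    (∀ sol ∈ rest, makespan data sol = some (valOf data sol)) →
    w ∈ pre → (∀ y ∈ pre, y ≤ w) → PySem.List.index? pre w = some ind →
    fwsGo data rest (pre.length : Int) (ind : Int) (some w)
      = ((((PySem.List.index? (pre ++ rest.map (valOf data))
            ((rest.map (valOf data)).foldl max w)).getD 0 : Nat) : Int),
         some ((rest.map (valOf data)).foldl max w)) := by
  intro rest
  induction rest with
  | nil =>
    intro pre ind w _ hmem hmax hidx
    simp only [fwsGo, List.map_nil, List.foldl_nil, List.append_nil]
    rw [hidx]
    simp
  | cons sA rest ih =>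
    intro pre ind w hall hmem hmax hidx
    have hvs : makespan data sA = some (valOf data sA) := hall sA (by simp)
    simp only [fwsGo, hvs]
    set v := valOf data sA with hv
    by_cases hlt : w < v
    · rw [if_pos hlt]
      have hnotin : v ∉ pre := fun hin => absurd (hmax v hin) (by omega)
      have e : (pre.length : Int) + 1 = (((pre ++ [v]).length : Nat) : Int) := by simp
      have e2 : (pre.length : Int) = (((pre.length : Nat)) : Int) := rfl
      rw [e]
      rw [ih (pre ++ [v]) pre.length v (fun s hs => hall s (by simp [hs]))
          (by simp) ?_ (PySem.List.index?_append_singleton_self pre v hnotin)]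
      · simp only [List.map_cons, List.foldl_cons, List.append_assoc, List.singleton_append]
        rw [max_eq_right (le_of_lt hlt)]
      · intro y hy
        rcases List.mem_append.1 hy with h1 | h1
        · exact le_of_lt (lt_of_le_of_lt (hmax y h1) hlt)
        · simp at h1; omega
    · rw [if_neg hlt]
      have e : (pre.length : Int) + 1 = (((pre ++ [v]).length : Nat) : Int) := by simp
      rw [e]
      rw [ih (pre ++ [v]) ind w (fun s hs => hall s (by simp [hs]))
          (by simp [hmem]) ?_ (by rw [PySem.List.index?_append_of_mem _ hmem]; exact hidx)]
      · simp only [List.map_cons, List.foldl_cons, List.append_assoc, List.singleton_append]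
        rw [max_eq_left (by omega)]
      · intro y hy
        rcases List.mem_append.1 hy with h1 | h1
        · exact hmax y h1
        · simp at h1; omega

-- ===== VERDICT (by name: the statement is the Claim_ definition above) =====
theorem findWorstSolution_spec : Claim_equal_findWorstSolution := by
  intro pop data _hdom hpre
  unfold Spec_findWorstSolution
  obtain ⟨hpop, hdata, hsols⟩ := hpre
  obtain ⟨s0, rest, rfl⟩ : ∃ s0 rest, pop = s0 :: rest := by
    cases pop with
    | nil => exact absurd rfl hpop
    | cons a b => exact ⟨a, b, rfl⟩
  have hms : ∀ sol ∈ s0 :: rest, makespan data sol = some (valOf data sol) := by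
    intro sol hs
    exact makespan_eq_val data sol hdata (hsols sol hs).1
      (fun t ht => ⟨((hsols sol hs).2 t ht).1, ((hsols sol hs).2 t ht).2.1⟩)
  have hmsB : ∀ sol ∈ s0 :: rest, makespanAlt data sol = some (valOf data sol) := by
    intro sol hs
    exact makespanAlt_eq_val data sol (hsols sol hs).1
      (fun t ht => ⟨((hsols sol hs).2 t ht).1, ((hsols sol hs).2 t ht).2.1⟩)
  -- A's side
  have hA : findWorstSolution (s0 :: rest) data
      = ((((PySem.List.index? (valOf data s0 :: rest.map (valOf data))
            ((rest.map (valOf data)).foldl max (valOf data s0))).getD 0 : Nat) : Int),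
         (rest.map (valOf data)).foldl max (valOf data s0)) := by
    unfold findWorstSolution
    dsimp only
    rw [hms s0 (by simp)]
    have hsc := fwsGo_eq data rest [valOf data s0] 0 (valOf data s0)
      (fun s hs => hms s (by simp [hs])) (by simp) (by simp)
      (PySem.List.index?_cons_self _ _)
    norm_num at hsc
    rw [hsc]
    simp [PySem.List.index?_eq_idxOf?]
  -- B's side
  have hmap : (s0 :: rest).map (fun sol => makespanAlt data sol)
      = (valOf data s0 :: rest.map (valOf data)).map some := by
    simp only [List.map_cons, List.map_map]
    rw [hmsB s0 (by simp)]
    congr 1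
    apply List.map_congr_left
    intro s hs
    exact hmsB s (by simp [hs])
  have hB : findWorstSolution_alt (s0 :: rest) data
      = ((((PySem.List.index? (valOf data s0 :: rest.map (valOf data))
            ((rest.map (valOf data)).foldl max (valOf data s0))).getD 0 : Nat) : Int),
         (rest.map (valOf data)).foldl max (valOf data s0)) := by
    unfold findWorstSolution_alt
    rw [hmap, pv_mapM_map_some]
    simp only [PySem.List.max?_id_cons]
  rw [hA, hB]
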